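-- pv_equiv track=rewrite | github.com/DevHyun2/Algorithm | 프로그래머스/1/135808. 과일 장수/과일 장수.py | solution
-- ===== SOURCE A (Python) =====
-- def solution(k, m, score):
--     score.sort(reverse = True)
--     max_income = 0
--     for i in range(0,len(score),m):
--         apple_box = score[i:i+m]
--         if len(apple_box) == m:
--             max_income += min(apple_box) * m
--     return max_income
-- ===== SOURCE B (Python) =====
-- def solution(k, m, score):
--     if m <= 0:
--         return 0
--     counts = {}
--     for s in score:
--         counts[s] = counts.get(s, 0) + 1
--     total = 0
--     cum = 0
--     for v in sorted(counts, reverse=True):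
--         prev = cum
--         cum += counts[v]
--         total += v * (cum // m - prev // m)
--     return m * total
-- ===== Notes on version B (the rewrite author's own statement) =====
-- stated objective: alternative
-- what changed: Replaces A's sort-then-box-slicing-with-min() loop by a value-frequency counter: B tallies score into a dict, walks the distinct values in descending order keeping a cumulative count, and adds v times the number of complete boxes whose minimum is v, computed as cum//m - prev//m; no boxes are materialised and the input list is never sorted or mutated.
import Mathlib
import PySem

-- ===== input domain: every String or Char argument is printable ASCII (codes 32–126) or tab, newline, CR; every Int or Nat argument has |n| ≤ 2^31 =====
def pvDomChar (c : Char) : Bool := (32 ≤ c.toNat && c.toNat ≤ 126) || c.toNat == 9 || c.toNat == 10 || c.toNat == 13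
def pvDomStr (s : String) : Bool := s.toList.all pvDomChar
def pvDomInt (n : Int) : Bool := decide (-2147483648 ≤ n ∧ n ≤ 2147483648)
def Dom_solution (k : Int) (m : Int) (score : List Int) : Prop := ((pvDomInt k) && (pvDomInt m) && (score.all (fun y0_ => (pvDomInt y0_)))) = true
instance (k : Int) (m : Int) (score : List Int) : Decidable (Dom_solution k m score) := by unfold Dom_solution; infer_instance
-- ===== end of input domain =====

-- B replaces A's sort + box-slicing + min() loop by a value-frequency counter walked in descending
-- value order, counting complete boxes per value with floor division (cum//m - prev//m).
-- A sorts `score` in place (a caller-visible mutation); B does not mutate: the equivalence proved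
-- here is about the RETURN value only.  Pre_ excludes m = 0, where A raises ValueError.


-- ===== PORT A =====
-- literal port of A: sort descending, then for i in range(0, len, m) slice the box and, if full,
-- add min(box)*m.  Python's min raises on []; inside the 'length = m' branch with m ≠ 0 the box is
-- nonempty, so the .getD 0 default is never used there.
def solution (k : Int) (m : Int) (score : List Int) : Int :=
  let s := PySem.List.sorted score (fun x => x) true
  (PySem.List.pyRange 0 (s.length : Int) m).foldl
    (fun acc i =>
      let apple_box := PySem.List.slice s (some i) (some (i + m))
      if ((apple_box.length : Int) = m) then acc + (PySem.List.min? apple_box (fun x => x)).getD 0 * m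
      else acc) 0

-- ===== PORT B =====
-- literal port of Source B: guard m <= 0, build the counts dict by a fold over score, then fold over
-- sorted(counts, reverse=True) carrying (cum, total); counts[v] is ported as getD v 0, exact here
-- because every iterated v is a key of counts.
def solution_alt (k : Int) (m : Int) (score : List Int) : Int :=
  if m ≤ 0 then 0
  else
    let counts := score.foldl (fun d v => d.insert v (d.getD v 0 + 1)) PySem.Dict.empty
    m * ((PySem.List.sorted counts.keys (fun x => x) true).foldl
          (fun (p : Int × Int) v =>
            (p.1 + counts.getD v 0,
             p.2 + v * (PySem.Int.floordiv (p.1 + counts.getD v 0) m - PySem.Int.floordiv p.1 m)))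
          (0, 0)).2

-- ===== PRECONDITION & SPEC =====
-- Pre_ excludes exactly m = 0, where A raises ValueError from range's zero step.
def Pre_solution (k : Int) (m : Int) (score : List Int) : Prop := m ≠ 0
instance (k : Int) (m : Int) (score : List Int) : Decidable (Pre_solution k m score) := by unfold Pre_solution; infer_instance
def pvWitness_solution : Int × Int × List Int := (4, 3, [4, 1, 2, 2, 5, 1, 2, 1])


def Spec_solution (k : Int) (m : Int) (score : List Int) (out : Int) : Prop := out = solution_alt k m score
instance (k : Int) (m : Int) (score : List Int) (out : Int) : Decidable (Spec_solution k m score out) := by unfold Spec_solution; infer_instance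

-- ===== CLAIM (what is proved, stated in full; the proofs are below) =====
def Claim_equal_solution : Prop := ∀ (k : Int) (m : Int) (score : List Int), Dom_solution k m score → Pre_solution k m score → Spec_solution k m score (solution k m score)

-- ===== LEMMAS AND PROOFS =====

-- range(a, b, step) is empty when step < 0 and a ≤ b
lemma pyRange_nil_of_neg {a b step : Int} (hs : step < 0) (hab : a ≤ b) :
    PySem.List.pyRange a b step = [] := by
  unfold PySem.List.pyRange
  rw [if_neg (by omega)]
  simp only [if_neg (by omega : ¬ 0 < step), if_neg (by omega : ¬ b < a)]
  simp

-- range(a, b, step) is empty when 0 < step and b ≤ a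
lemma pyRange_nil_of_pos {a b step : Int} (hs : 0 < step) (hab : b ≤ a) :
    PySem.List.pyRange a b step = [] := by
  rw [PySem.List.pyRange_of_pos a b hs, if_neg (by omega)]
  simp

-- cons form of range(a, b, step) for a positive step
lemma pyRange_cons_of_pos {a b step : Int} (hs : 0 < step) (hab : a < b) :
    PySem.List.pyRange a b step = a :: PySem.List.pyRange (a + step) b step := by
  rw [PySem.List.pyRange_of_pos a b hs, PySem.List.pyRange_of_pos (a + step) b hs,
      if_pos hab]
  by_cases h2 : a + step < b
  · rw [if_pos h2]
    have hc : ((b - a + step - 1) / step).toNat = ((b - (a + step) + step - 1) / step).toNat + 1 := by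
      have : b - a + step - 1 = (b - (a + step) + step - 1) + 1 * step := by ring
      rw [this, Int.add_mul_ediv_right _ _ (by omega : step ≠ 0)]
      have h0 : 0 ≤ (b - (a + step) + step - 1) / step := by
        apply Int.ediv_nonneg <;> omega
      omega
    rw [hc, List.range_succ_eq_map]
    simp only [List.map_cons, List.map_map]
    congr 1
    · simp
    apply List.map_congr_left
    intro k _
    simp [Function.comp]
    ring
  · rw [if_neg h2]
    have hc : ((b - a + step - 1) / step).toNat = 1 := by
      have : b - a + step - 1 = (b - a - 1) + 1 * step := by ring
      rw [this, Int.add_mul_ediv_right _ _ (by omega : step ≠ 0),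
          Int.ediv_eq_zero_of_lt (by omega) (by omega)]
      decide
    simp [hc, List.range_succ]

-- shift lemma: range(a+c, b+c, step) = [x + c for x in range(a, b, step)]
lemma pyRange_shift {a b c step : Int} (hs : 0 < step) :
    PySem.List.pyRange (a + c) (b + c) step = (PySem.List.pyRange a b step).map (· + c) := by
  rw [PySem.List.pyRange_of_pos _ _ hs, PySem.List.pyRange_of_pos _ _ hs]
  have : (b + c) - (a + c) = b - a := by ring
  rw [this]
  by_cases h : a < b
  · rw [if_pos (by omega), if_pos h, List.map_map]
    apply List.map_congr_left
    intro k _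
    simp; ring
  · rw [if_neg (by omega), if_neg h]; simp

-- in a descending list the last element is a minimum
lemma getLast_le_of_sorted : ∀ (l : List Int) (_ : l.Pairwise (· ≥ ·)) (hne : l ≠ []),
    ∀ x ∈ l, l.getLast hne ≤ x := by
  intro l
  induction l with
  | nil => intro _ hne; exact absurd rfl hne
  | cons a t ih =>
      intro h hne x hx
      rcases List.pairwise_cons.mp h with ⟨ha, ht⟩
      rcases List.mem_cons.mp hx with rfl | hxt
      · cases t with
        | nil => simp [List.getLast]
        | cons b u =>
            have hne' : b :: u ≠ [] := by simp
            rw [List.getLast_cons hne']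
            exact ha _ (List.getLast_mem hne')
      · have hne' : t ≠ [] := List.ne_nil_of_mem hxt
        rw [List.getLast_cons hne']
        exact ih ht hne' x hxt

-- min() of a nonempty descending list is its last element
lemma min?_getD_of_sorted (l : List Int) (h : l.Pairwise (· ≥ ·)) (hne : l ≠ []) :
    (PySem.List.min? l (fun x => x)).getD 0 = l.getLast hne := by
  cases hmn : PySem.List.min? l (fun x => x) with
  | none => exact absurd ((PySem.List.min?_eq_none_iff l _).mp hmn) hne
  | some mn =>
      simp only [Option.getD_some]
      exact le_antisymm (PySem.List.min?_isMin hmn _ (List.getLast_mem hne))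
        (getLast_le_of_sorted l h hne mn (PySem.List.min?_mem hmn))

-- core A-side lemma: on a descending list, A's per-box min sum equals m times the strided sum
lemma main_sum (m : Int) (hm : 1 ≤ m) : ∀ (N : Nat) (s : List Int), s.length ≤ N →
    s.Pairwise (· ≥ ·) →
    ((PySem.List.pyRange 0 (s.length : Int) m).map (fun i =>
        if (((PySem.List.slice s (some i) (some (i + m))).length : Int) = m)
        then (PySem.List.min? (PySem.List.slice s (some i) (some (i + m))) (fun x => x)).getD 0 * m
        else 0)).sum
      = m * ((PySem.List.pyRange (m - 1) (s.length : Int) m).map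
              (fun i => PySem.List.pyGetD s i 0)).sum := by
  intro N
  induction N with
  | zero =>
      intro s hlen _
      have hs : s = [] := List.eq_nil_of_length_eq_zero (by omega)
      subst hs
      rw [pyRange_nil_of_pos (by omega) (by simp), pyRange_nil_of_pos (by omega) (by simp; omega)]
      simp
  | succ N ih =>
      intro s hlen hsort
      by_cases hsm : (s.length : Int) < m
      · have hB : PySem.List.pyRange (m - 1) ((s.length : Nat) : Int) m = [] :=
          pyRange_nil_of_pos (by omega) (by omega)
        rw [hB]
        simp only [List.map_nil, List.sum_nil, mul_zero]
        apply List.sum_eq_zero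
        intro x hx
        rcases List.mem_map.mp hx with ⟨i, hi, rfl⟩
        have h1 := PySem.List.length_slice s i (i + m)
        have h2 := PySem.List.clampIdx_le s.length (i + m)
        rw [if_neg (by omega)]
      · rw [Int.not_lt] at hsm
        have hmN : m.toNat ≤ s.length := by omega
        have hne : s.take m.toNat ≠ [] := by
          intro hc
          have := congrArg List.length hc
          rw [List.length_take] at this
          simp only [List.length_nil] at this
          omega
        set s' := s.drop m.toNat with hs'
        have hlen' : (s'.length : Int) = (s.length : Int) - m := by
          simp only [hs', List.length_drop]
          omega
        have hsort' : s'.Pairwise (· ≥ ·) := hsort.sublist (List.drop_sublist _ _)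
        rw [pyRange_cons_of_pos (a := 0) (b := (s.length : Int)) (step := m) (by omega) (by omega)]
        have hshiftA : PySem.List.pyRange (0 + m) (s.length : Int) m
            = (PySem.List.pyRange 0 (s'.length : Int) m).map (· + m) := by
          have h2 : ((s.length : Nat) : Int) = (s'.length : Int) + m := by omega
          rw [h2]
          exact pyRange_shift (by omega)
        rw [List.map_cons, List.sum_cons, hshiftA, List.map_map]
        rw [pyRange_cons_of_pos (a := m - 1) (b := (s.length : Int)) (step := m) (by omega) (by omega)]
        have hshiftB : PySem.List.pyRange (m - 1 + m) (s.length : Int) m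
            = (PySem.List.pyRange (m - 1) (s'.length : Int) m).map (· + m) := by
          have h2 : ((s.length : Nat) : Int) = (s'.length : Int) + m := by omega
          rw [h2]
          exact pyRange_shift (by omega)
        rw [List.map_cons, List.sum_cons, hshiftB, List.map_map]
        have htailA : ∀ i ∈ PySem.List.pyRange 0 (s'.length : Int) m,
            PySem.List.slice s (some (i + m)) (some (i + m + m))
              = PySem.List.slice s' (some i) (some (i + m)) := by
          intro i hi
          have h0i : 0 ≤ i := ((PySem.List.mem_pyRange_iff_of_pos (by omega) i).mp hi).1
          rw [PySem.List.slice_toNat _ (by omega) (by omega),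
              PySem.List.slice_toNat _ (by omega) (by omega)]
          rw [hs', List.drop_drop]
          congr 1
          · omega
          · congr 1; omega
        have htailB : ∀ i ∈ PySem.List.pyRange (m - 1) (s'.length : Int) m,
            PySem.List.pyGetD s (i + m) 0 = PySem.List.pyGetD s' i 0 := by
          intro i hi
          rcases (PySem.List.mem_pyRange_iff_of_pos (by omega) i).mp hi with ⟨hlo, hhi, -⟩
          rw [PySem.List.pyGetD_eq_getElem _ _ (by omega) (by omega),
              PySem.List.pyGetD_eq_getElem _ _ (by omega) (by omega)]
          have hq : s[(i + m).toNat]? = s'[i.toNat]? := by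
            rw [hs', List.getElem?_drop]
            congr 1
            omega
          rw [List.getElem?_eq_getElem (by omega), List.getElem?_eq_getElem (by omega)] at hq
          exact Option.some.inj hq
        have hmapA : List.map ((fun i =>
              if (((PySem.List.slice s (some i) (some (i + m))).length : Int) = m)
              then (PySem.List.min? (PySem.List.slice s (some i) (some (i + m))) (fun x => x)).getD 0 * m
              else 0) ∘ (fun x => x + m)) (PySem.List.pyRange 0 (s'.length : Int) m)
            = List.map (fun i =>
              if (((PySem.List.slice s' (some i) (some (i + m))).length : Int) = m)
              then (PySem.List.min? (PySem.List.slice s' (some i) (some (i + m))) (fun x => x)).getD 0 * m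
              else 0) (PySem.List.pyRange 0 (s'.length : Int) m) := by
          apply List.map_congr_left
          intro i hi
          simp only [Function.comp_apply]
          rw [htailA i hi]
        have hmapB : List.map ((fun i => PySem.List.pyGetD s i 0) ∘ (fun x => x + m))
              (PySem.List.pyRange (m - 1) (s'.length : Int) m)
            = List.map (fun i => PySem.List.pyGetD s' i 0)
              (PySem.List.pyRange (m - 1) (s'.length : Int) m) := by
          apply List.map_congr_left
          intro i hi
          simp only [Function.comp_apply]
          rw [htailB i hi]
        rw [hmapA, hmapB]
        rw [ih s' (by simp only [hs', List.length_drop]; omega) hsort']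
        have hslice0 : PySem.List.slice s (some 0) (some (0 + m)) = s.take m.toNat := by
          rw [PySem.List.slice_toNat _ (by omega) (by omega)]
          simp
        have hlen0 : ((PySem.List.slice s (some 0) (some (0 + m))).length : Int) = m := by
          rw [hslice0]; simp; omega
        rw [if_pos hlen0, hslice0]
        rw [min?_getD_of_sorted _ (hsort.sublist (List.take_sublist _ _)) hne]
        rw [PySem.List.pyGetD_eq_getElem _ _ (by omega) (by omega)]
        rw [List.getLast_eq_getElem, List.getElem_take]
        have hidx : (s.take m.toNat).length - 1 = (m - 1).toNat := by
          simp only [List.length_take]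
          omega
        simp only [hidx]
        ring

-- a descending list is its maximal value's run followed by the strictly smaller rest
lemma run_decomp : ∀ (s : List Int) (v : Int), s.Pairwise (· ≥ ·) → (∀ x ∈ s, x ≤ v) →
    s = List.replicate (s.count v) v ++ s.filter (fun x => x != v) := by
  intro s
  induction s with
  | nil => intro v _ _; simp
  | cons x t ih =>
      intro v hp hb
      rcases List.pairwise_cons.mp hp with ⟨hx, ht⟩
      by_cases hxv : x = v
      · subst hxv
        have hbt : ∀ y ∈ t, y ≤ x := fun y hy => hx y hy
        rw [List.count_cons_self]
        simp only [List.filter_cons, bne_self_eq_false, List.replicate_succ, List.cons_append]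
        exact congrArg (x :: ·) (ih x ht hbt)
      · have hxlt : x < v := lt_of_le_of_ne (hb x (by simp)) hxv
        have hnv : v ∉ x :: t := by
          intro hv
          rcases List.mem_cons.mp hv with rfl | hvt
          · exact hxv rfl
          · exact absurd (hx v hvt) (by omega)
        rw [List.count_eq_zero.mpr hnv, List.filter_eq_self.mpr]
        · simp
        · intro y hy
          rcases List.mem_cons.mp hy with rfl | hyt
          · simp [hxv]
          · have := hx y hyt
            simp; omega

-- the running total of B's fold is additive in its start value
lemma fold_snd (cnt : Int → Int) (mI : Int) : ∀ (ks : List Int) (x t : Int),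
    (ks.foldl (fun (p : Int × Int) v =>
        (p.1 + cnt v,
         p.2 + v * (PySem.Int.floordiv (p.1 + cnt v) mI - PySem.Int.floordiv p.1 mI))) (x, t)).2
    = t + (ks.foldl (fun (p : Int × Int) v =>
        (p.1 + cnt v,
         p.2 + v * (PySem.Int.floordiv (p.1 + cnt v) mI - PySem.Int.floordiv p.1 mI))) (x, 0)).2 := by
  intro ks
  induction ks with
  | nil => intro x t; simp
  | cons v ks' ih =>
      intro x t
      simp only [List.foldl_cons]
      rw [ih, ih (t := 0 + v * (PySem.Int.floordiv (x + cnt v) mI - PySem.Int.floordiv x mI))]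
      ring

-- core B-side lemma: B's counting fold over the distinct values of a descending list s, started
-- with `a` elements already consumed, equals the sum of the box-minimum entries of s
lemma count_sum (m : Nat) (hm : 1 ≤ m) :
    ∀ (ks : List Int), ∀ (s : List Int) (a : Nat),
      s.Pairwise (· ≥ ·) → ks.Pairwise (· > ·) → (∀ v, v ∈ ks ↔ v ∈ s) →
      ((List.range ((a + s.length) / m - a / m)).map
          (fun j => s.getD ((a / m + j + 1) * m - 1 - a) 0)).sum
      = (ks.foldl (fun (p : Int × Int) v =>
            (p.1 + (s.count v : Int),
             p.2 + v * (PySem.Int.floordiv (p.1 + (s.count v : Int)) (m : Int)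
                        - PySem.Int.floordiv p.1 (m : Int)))) ((a : Int), 0)).2 := by
  intro ks
  induction ks with
  | nil =>
      intro s a _ _ hmem
      have hs : s = [] := by
        cases s with
        | nil => rfl
        | cons x t => exact absurd ((hmem x).mpr (by simp)) (by simp)
      subst hs
      simp
  | cons v ks' ih =>
      intro s a hs hks hmem
      rcases List.pairwise_cons.mp hks with ⟨hvk, hks'⟩
      have hvs : v ∈ s := (hmem v).mp (by simp)
      have hmax : ∀ x ∈ s, x ≤ v := by
        intro x hx
        rcases List.mem_cons.mp ((hmem x).mpr hx) with rfl | hxk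
        · exact le_refl x
        · exact le_of_lt (hvk x hxk)
      have hdec : s = List.replicate (s.count v) v ++ s.filter (fun x => x != v) := run_decomp s v hs hmax
      have hlen : s.length = s.count v + (s.filter (fun x => x != v)).length := by
        conv_lhs => rw [hdec]
        simp
      have hp' : (s.filter (fun x => x != v)).Pairwise (· ≥ ·) := hs.sublist List.filter_sublist
      have hmem' : ∀ w, w ∈ ks' ↔ w ∈ s.filter (fun x => x != v) := by
        intro w
        constructor
        · intro hw
          have hwlt : w < v := hvk w hw
          exact List.mem_filter.mpr ⟨(hmem w).mp (List.mem_cons_of_mem _ hw), by simp; omega⟩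
        · intro hw
          rcases List.mem_filter.mp hw with ⟨hws, hne⟩
          have hwv : w ≠ v := by simpa using hne
          rcases List.mem_cons.mp ((hmem w).mpr hws) with rfl | h
          · exact absurd rfl hwv
          · exact h
      have hcnt : ∀ w ∈ ks', s.count w = (s.filter (fun x => x != v)).count w := by
        intro w hw
        have hwv : w ≠ v := by have := hvk w hw; omega
        rw [List.count_filter (by simp [hwv])]
      set c := s.count v with hcdef
      set s' := s.filter (fun x => x != v) with hs'def
      -- arithmetic facts
      have hm0 : 0 < m := hm
      have l1 : m * (a / m) + a % m = a := Nat.div_add_mod a m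
      have r1 : a % m < m := Nat.mod_lt _ hm0
      have l2 : m * ((a + c) / m) + (a + c) % m = a + c := Nat.div_add_mod _ m
      have r2 : (a + c) % m < m := Nat.mod_lt _ hm0
      have hd12 : a / m ≤ (a + c) / m := Nat.div_le_div_right (by omega)
      have hd23 : (a + c) / m ≤ (a + c + s'.length) / m := Nat.div_le_div_right (by omega)
      have e3 : a + 1 ≤ (a / m + 1) * m := by
        calc a + 1 = m * (a / m) + a % m + 1 := by omega
          _ ≤ m * (a / m) + m := by omega
          _ = (a / m + 1) * m := by ring
      have e3' : a + c + 1 ≤ ((a + c) / m + 1) * m := by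
        calc a + c + 1 = m * ((a + c) / m) + (a + c) % m + 1 := by omega
          _ ≤ m * ((a + c) / m) + m := by omega
          _ = ((a + c) / m + 1) * m := by ring
      -- split the LHS range at the end of v's run
      have hsplit : (a + s.length) / m - a / m
          = ((a + c) / m - a / m) + ((a + c + s'.length) / m - (a + c) / m) := by
        rw [hlen, show a + (c + s'.length) = a + c + s'.length by omega]
        omega
      rw [hsplit, List.range_add, List.map_append, List.sum_append]
      -- first chunk: every selected entry lies in v's run
      have hfst : ((List.range ((a + c) / m - a / m)).map
            (fun j => s.getD ((a / m + j + 1) * m - 1 - a) 0)).sum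
          = (((a + c) / m - a / m : Nat) : Int) * v := by
        rw [List.map_congr_left (g := fun _ => v) ?_]
        · simp [List.map_const', List.sum_replicate, mul_comm]
        · intro j hj
          have hjlt : j < (a + c) / m - a / m := List.mem_range.mp hj
          have e1 : (a / m + j + 1) * m ≤ (a + c) / m * m := Nat.mul_le_mul_right m (by omega)
          have e2 : (a + c) / m * m ≤ a + c := Nat.div_mul_le_self _ _
          have e4 : (a / m + 1) * m ≤ (a / m + j + 1) * m := Nat.mul_le_mul_right m (by omega)
          have hic : (a / m + j + 1) * m - 1 - a < c := by omega
          conv_lhs => rw [hdec]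
          rw [List.getD_eq_getElem?_getD, List.getElem?_append_left (by simp [List.length_replicate]; omega),
              List.getElem?_replicate]
          simp [hic]
      rw [hfst]
      -- second chunk is the recursive sum over s'
      have hsnd : ∀ j' ∈ List.range ((a + c + s'.length) / m - (a + c) / m),
          ((fun j => s.getD ((a / m + j + 1) * m - 1 - a) 0) ∘
            (fun j => (a + c) / m - a / m + j)) j'
          = s'.getD (((a + c) / m + j' + 1) * m - 1 - (a + c)) 0 := by
        intro j' hj'
        have hj'lt : j' < (a + c + s'.length) / m - (a + c) / m := List.mem_range.mp hj'
        simp only [Function.comp_apply]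
        rw [show a / m + ((a + c) / m - a / m + j') + 1 = (a + c) / m + j' + 1 by omega]
        have e1 : ((a + c) / m + 1) * m ≤ ((a + c) / m + j' + 1) * m := Nat.mul_le_mul_right m (by omega)
        have e2 : ((a + c) / m + j' + 1) * m ≤ (a + c + s'.length) / m * m := Nat.mul_le_mul_right m (by omega)
        have e5 : (a + c + s'.length) / m * m ≤ a + c + s'.length := Nat.div_mul_le_self _ _
        have hge : c ≤ ((a + c) / m + j' + 1) * m - 1 - a := by omega
        conv_lhs => rw [hdec]
        rw [List.getD_eq_getElem?_getD, List.getElem?_append_right (by simp [List.length_replicate]; omega)]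
        rw [List.length_replicate, ← List.getD_eq_getElem?_getD]
        congr 1
        omega
      rw [List.map_map, List.map_congr_left hsnd]
      rw [ih s' (a + c) hp' hks' hmem']
      -- unfold one step of the fold and use additivity of the running total
      simp only [List.foldl_cons]
      conv_rhs => rw [fold_snd]
      have hswap : (ks'.foldl (fun (p : Int × Int) w =>
            (p.1 + (s.count w : Int),
             p.2 + w * (PySem.Int.floordiv (p.1 + (s.count w : Int)) (m : Int)
                        - PySem.Int.floordiv p.1 (m : Int)))) ((a : Int) + (s.count v : Int), 0))
          = (ks'.foldl (fun (p : Int × Int) w =>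
            (p.1 + (s'.count w : Int),
             p.2 + w * (PySem.Int.floordiv (p.1 + (s'.count w : Int)) (m : Int)
                        - PySem.Int.floordiv p.1 (m : Int)))) (((a + c : Nat) : Int), 0)) := by
        rw [show (a : Int) + (s.count v : Int) = (((a + c) : Nat) : Int) by push_cast [hcdef]; ring]
        apply PySem.List.foldl_congr_mem'
        intro w hw p
        rw [hcnt w hw]
      rw [hswap]
      have hfd : PySem.Int.floordiv ((a : Int) + (s.count v : Int)) (m : Int)
            - PySem.Int.floordiv (a : Int) (m : Int)
          = (((a + c) / m - a / m : Nat) : Int) := by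
        rw [show (a : Int) + (s.count v : Int) = (((a + c) : Nat) : Int) by push_cast [hcdef]; ring]
        rw [PySem.Int.floordiv_natCast, PySem.Int.floordiv_natCast]
        push_cast [Nat.cast_sub hd12]
        ring
      rw [hfd]
      ring

-- bridge: the pyRange-strided sum is the Nat-range sum used by count_sum (at a = 0)
lemma strided_bridge (m : Nat) (hm : 1 ≤ m) (s : List Int) :
    ((PySem.List.pyRange ((m : Int) - 1) (s.length : Int) (m : Int)).map
        (fun i => PySem.List.pyGetD s i 0)).sum
    = ((List.range ((0 + s.length) / m - 0 / m)).map
        (fun j => s.getD ((0 / m + j + 1) * m - 1 - 0) 0)).sum := by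
  have hm' : (0 : Int) < (m : Int) := by exact_mod_cast hm
  simp only [Nat.zero_div, zero_add, Nat.sub_zero]
  rw [PySem.List.pyRange_of_pos _ _ hm']
  by_cases h : (m : Int) - 1 < (s.length : Int)
  · rw [if_pos h]
    have harg : (s.length : Int) - ((m : Int) - 1) + (m : Int) - 1 = (s.length : Int) := by ring
    rw [harg]
    have hdiv : ((s.length : Int) / (m : Int)).toNat = s.length / m := by
      rw [← Int.natCast_ediv]
      exact Int.toNat_natCast _
    rw [hdiv, List.map_map]
    congr 1
    apply List.map_congr_left
    intro j hj
    have hjlt : j < s.length / m := List.mem_range.mp hj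
    have hb1 : (j + 1) * m ≤ s.length / m * m := Nat.mul_le_mul_right m (by omega)
    have hb2 : s.length / m * m ≤ s.length := Nat.div_mul_le_self _ _
    have hb3 : 1 ≤ (j + 1) * m := by
      calc 1 ≤ 1 * m := by omega
      _ ≤ (j + 1) * m := Nat.mul_le_mul_right m (by omega)
    simp only [Function.comp_apply]
    have hidx : (m : Int) - 1 + (m : Int) * (j : Int) = (((j + 1) * m - 1 : Nat) : Int) := by
      push_cast [Nat.cast_sub hb3]
      ring
    rw [hidx, PySem.List.pyGetD_eq_getElem _ _ (by omega) (by exact_mod_cast (by omega : (j+1)*m - 1 < s.length))]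
    rw [List.getD_eq_getElem?_getD, List.getElem?_eq_getElem (by omega : (j+1)*m - 1 < s.length)]
    simp
  · rw [if_neg h]
    have hlt : s.length < m := by omega
    rw [Nat.div_eq_of_lt hlt]
    simp

-- ===== VERDICT (by name: the statement is the Claim_ definition above) =====
theorem solution_spec : Claim_equal_solution := by
  intro k m score _ hpre
  unfold Spec_solution solution solution_alt
  simp only []
  set s := PySem.List.sorted score (fun x => x) true with hsdef
  by_cases hm : 1 ≤ m
  · rw [if_neg (by omega : ¬ m ≤ 0)]
    have hsort : s.Pairwise (· ≥ ·) :=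
      (PySem.List.sorted_pairwise_rev score (fun x => x)).imp (fun h => h)
    have hA : (fun (acc : Int) i =>
        let apple_box := PySem.List.slice s (some i) (some (i + m))
        if ((apple_box.length : Int) = m) then
          acc + (PySem.List.min? apple_box (fun x => x)).getD 0 * m
        else acc)
      = fun acc i => acc + (if (((PySem.List.slice s (some i) (some (i + m))).length : Int) = m)
          then (PySem.List.min? (PySem.List.slice s (some i) (some (i + m))) (fun x => x)).getD 0 * m
          else 0) := by
      funext acc i; simp only []; split <;> simp
    rw [hA, PySem.List.foldl_add]
    simp only [zero_add]
    rw [main_sum m hm s.length s le_rfl hsort]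
    set M := m.toNat with hMdef
    have hmM : m = (M : Int) := by omega
    have hM1 : 1 ≤ M := by omega
    rw [hmM, strided_bridge M hM1 s]
    rw [PySem.Dict.foldl_insert_getD_add_one_eq_counter, PySem.Dict.keys_counter]
    set ks := PySem.List.sorted (PySem.Set.ofList score) (fun x => x) true with hksdef
    have hperm : s.Perm score := PySem.List.sorted_perm score (fun x => x) true
    have hkperm : ks.Perm (PySem.Set.ofList score) :=
      PySem.List.sorted_perm (PySem.Set.ofList score) (fun x => x) true
    have hknodup : ks.Nodup := hkperm.nodup_iff.mpr (PySem.Set.nodup_ofList score)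
    have hkge : ks.Pairwise (· ≥ ·) :=
      (PySem.List.sorted_pairwise_rev (PySem.Set.ofList score) (fun x => x)).imp (fun h => h)
    have hkgt : ks.Pairwise (· > ·) :=
      (hkge.and hknodup).imp (fun h => lt_of_le_of_ne h.1 (Ne.symm h.2))
    have hmemks : ∀ w, w ∈ ks ↔ w ∈ s := by
      intro w
      rw [hksdef, PySem.List.mem_sorted, PySem.Set.mem_ofList, hsdef, PySem.List.mem_sorted]
    have hfun : (fun (p : Int × Int) v =>
          (p.1 + (PySem.Dict.counter score).getD v 0,
           p.2 + v * (PySem.Int.floordiv (p.1 + (PySem.Dict.counter score).getD v 0) ((M : Nat) : Int)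
                      - PySem.Int.floordiv p.1 ((M : Nat) : Int))))
        = (fun (p : Int × Int) v =>
          (p.1 + (s.count v : Int),
           p.2 + v * (PySem.Int.floordiv (p.1 + (s.count v : Int)) ((M : Nat) : Int)
                      - PySem.Int.floordiv p.1 ((M : Nat) : Int)))) := by
      funext p v
      rw [PySem.Dict.getD_counter, hperm.count_eq]
    rw [hfun]
    have hkey := count_sum M hM1 ks s 0 hsort hkgt hmemks
    simp only [Nat.cast_zero] at hkey
    rw [← hkey]
  · rw [if_pos (by omega : m ≤ 0)]
    have hmneg : m < 0 := by
      rcases lt_or_eq_of_le (by omega : m ≤ 0) with h | h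
      · exact h
      · exact absurd h hpre
    rw [pyRange_nil_of_neg hmneg (by positivity)]
    simp
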